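-- pv_equiv track=rewrite | github.com/patrickpynadath1/dab | evaluation/bert_score_vocab.py | group_gens_by_prompt
-- ===== SOURCE A (Python) =====
-- def group_gens_by_prompt(gens, prompts):
--     grouped_gens = []
--     for p in prompts:
--         cur_group = []
--         for g in gens:
--             if p in g:
--                 cur_group.append(g)
--         grouped_gens.append(cur_group)
--     return grouped_gens
-- ===== SOURCE B (Python) =====
-- def group_gens_by_prompt(gens, prompts):
--     # Substring-index approach: hash all prompts once, enumerate each gen's
--     # substrings (only at prompt lengths) once to find its matching prompts,
--     # then emit the buckets from these precomputed match sets.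
--     prompt_set = set(prompts)
--     lengths = sorted({len(p) for p in prompts})
--     found = []
--     for g in gens:
--         s = set()
--         for j in range(len(g) + 1):
--             for L in lengths:
--                 sub = g[j:j + L]
--                 if sub in prompt_set:
--                     s.add(sub)
--         found.append(s)
--     return [[g for g, s in zip(gens, found) if p in s] for p in prompts]
-- ===== Notes on version B (the rewrite author's own statement) =====
-- stated objective: alternative
-- what changed: B builds a hash set of all prompts and, for each gen, enumerates its substrings at prompt lengths once to precompute the set of prompts occurring in it, then emits the buckets from these match sets - replacing A's per-prompt substring search over every gen.
import Mathlib
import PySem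

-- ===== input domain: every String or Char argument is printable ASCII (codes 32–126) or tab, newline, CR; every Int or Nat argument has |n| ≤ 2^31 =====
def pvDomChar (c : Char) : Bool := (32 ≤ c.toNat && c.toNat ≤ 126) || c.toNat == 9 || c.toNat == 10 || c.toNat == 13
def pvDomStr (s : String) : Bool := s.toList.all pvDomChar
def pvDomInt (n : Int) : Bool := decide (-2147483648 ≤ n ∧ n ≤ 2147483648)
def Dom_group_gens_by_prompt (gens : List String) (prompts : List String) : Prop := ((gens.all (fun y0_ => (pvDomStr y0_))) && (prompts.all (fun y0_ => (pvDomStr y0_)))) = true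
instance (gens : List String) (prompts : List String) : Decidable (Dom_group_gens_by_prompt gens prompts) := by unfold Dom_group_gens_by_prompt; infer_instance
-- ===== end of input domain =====

-- B indexes the prompts in a hash set and enumerates each gen's substrings (at prompt
-- lengths) once to precompute its matching prompts, instead of A's per-prompt scan of
-- every gen with a substring search; same result.

-- ===== PORT A =====
-- for p in prompts: cur_group = [g for g in gens if p in g] (built by append); grouped_gens.append(cur_group)
def group_gens_by_prompt (gens : List String) (prompts : List String) : List (List String) :=
  prompts.foldl
    (fun grouped_gens p =>
      grouped_gens ++
        [gens.foldl (fun cur_group g =>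
            if PySem.Str.isIn p g then cur_group ++ [g] else cur_group) []])
    []

-- ===== PORT B =====
-- inner loops of Source B: s = set(); for j in range(len(g)+1): for L in lengths:
--   sub = g[j:j+L]; if sub in prompt_set: s.add(sub)
def pvFoundSet (promptSet : PySem.Set String) (lengths : List Int) (g : String) :
    PySem.Set String :=
  (PySem.List.pyRange 0 (PySem.Str.len g + 1)).foldl
    (fun s j =>
      lengths.foldl
        (fun s L =>
          let sub := PySem.Str.slice g (some j) (some (j + L))
          if PySem.Set.contains promptSet sub then PySem.Set.add s sub else s)
        s)
    PySem.Set.empty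

-- prompt_set = set(prompts); lengths = sorted({len(p) for p in prompts});
-- found = [s-of-g for g in gens]; return [[g for g, s in zip(gens, found) if p in s] for p in prompts]
def group_gens_by_prompt_alt (gens : List String) (prompts : List String) : List (List String) :=
  let promptSet : PySem.Set String := PySem.Set.ofList prompts
  let lengths : List Int :=
    PySem.List.sorted (PySem.Set.ofList (prompts.map PySem.Str.len)) (fun x => x) false
  let found := gens.map (fun g => pvFoundSet promptSet lengths g)
  prompts.map (fun p =>
    ((gens.zip found).filter (fun gs => PySem.Set.contains gs.2 p)).map (fun gs => gs.1))

-- ===== PRECONDITION & SPEC =====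
def Spec_group_gens_by_prompt (gens : List String) (prompts : List String) (out : List (List String)) : Prop := out = group_gens_by_prompt_alt gens prompts
instance (gens : List String) (prompts : List String) (out : List (List String)) : Decidable (Spec_group_gens_by_prompt gens prompts out) := by unfold Spec_group_gens_by_prompt; infer_instance

-- ===== CLAIM (what is proved, stated in full; the proofs are below) =====
def Claim_equal_group_gens_by_prompt : Prop := ∀ (gens : List String) (prompts : List String), Dom_group_gens_by_prompt gens prompts → Spec_group_gens_by_prompt gens prompts (group_gens_by_prompt gens prompts)

-- ===== LEMMAS AND PROOFS =====

-- membership in one inner loop of pvFoundSet ('if sub in prompt_set: s.add(sub)')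
theorem pv_mem_inner (P : PySem.Set String) (g : String) (j : Int) (lengths : List Int)
    (s : PySem.Set String) (y : String) :
    (y ∈ lengths.foldl
        (fun s L =>
          let sub := PySem.Str.slice g (some j) (some (j + L))
          if PySem.Set.contains P sub then PySem.Set.add s sub else s)
        s)
      ↔ y ∈ s ∨ ∃ L ∈ lengths, PySem.Str.slice g (some j) (some (j + L)) = y ∧ y ∈ P := by
  induction lengths generalizing s with
  | nil => simp
  | cons L t ih =>
      simp only [List.foldl_cons, List.mem_cons, ih]
      by_cases h : PySem.Set.contains P (PySem.Str.slice g (some j) (some (j + L))) = true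
      · simp only [h, if_pos]
        rw [PySem.Set.contains_iff] at h
        constructor
        · rintro (hs | hrest)
          · rw [PySem.Set.mem_add] at hs
            rcases hs with hs | rfl
            · exact Or.inl hs
            · exact Or.inr ⟨L, Or.inl rfl, rfl, h⟩
          · rcases hrest with ⟨L', hL', hsl, hyP⟩
            exact Or.inr ⟨L', Or.inr hL', hsl, hyP⟩
        · rintro (hs | ⟨L', hL' | hL', hsl, hyP⟩)
          · exact Or.inl ((PySem.Set.mem_add s _ y).2 (Or.inl hs))
          · subst hL'
            exact Or.inl ((PySem.Set.mem_add s _ y).2 (Or.inr hsl.symm))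
          · exact Or.inr ⟨L', hL', hsl, hyP⟩
      · simp only [h, if_neg, Bool.not_eq_true]
        constructor
        · rintro (hs | ⟨L', hL', hsl, hyP⟩)
          · exact Or.inl hs
          · exact Or.inr ⟨L', Or.inr hL', hsl, hyP⟩
        · rintro (hs | ⟨L', hL' | hL', hsl, hyP⟩)
          · exact Or.inl hs
          · subst hL'
            rw [hsl] at h
            rw [PySem.Set.contains_iff] at h
            exact absurd hyP (by simpa using h)
          · exact Or.inr ⟨L', hL', hsl, hyP⟩

-- membership in the outer loop 'for j in jl: for L in lengths: …'
theorem pv_mem_outer (P : PySem.Set String) (lengths : List Int) (g : String)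
    (jl : List Int) (s : PySem.Set String) (y : String) :
    (y ∈ jl.foldl
        (fun s j =>
          lengths.foldl
            (fun s L =>
              let sub := PySem.Str.slice g (some j) (some (j + L))
              if PySem.Set.contains P sub then PySem.Set.add s sub else s)
            s)
        s)
      ↔ y ∈ s ∨ ∃ j ∈ jl, ∃ L ∈ lengths,
          PySem.Str.slice g (some j) (some (j + L)) = y ∧ y ∈ P := by
  induction jl generalizing s with
  | nil => simp
  | cons j t ih =>
      simp only [List.foldl_cons, ih, pv_mem_inner, List.mem_cons]
      aesop

-- membership in pvFoundSet: exactly the prompts that occur as a slice g[j:j+L]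
theorem pv_mem_foundSet (P : PySem.Set String) (lengths : List Int) (g : String) (y : String) :
    y ∈ pvFoundSet P lengths g
      ↔ ∃ j ∈ PySem.List.pyRange 0 (PySem.Str.len g + 1), ∃ L ∈ lengths,
          PySem.Str.slice g (some j) (some (j + L)) = y ∧ y ∈ P := by
  unfold pvFoundSet
  rw [pv_mem_outer]
  simp [PySem.Set.empty]

-- the heart: for a prompt p, 'p found among g's slices at prompt lengths' = 'p in g'
theorem pv_found_iff_isIn (prompts : List String) (g : String) (p : String)
    (hp : p ∈ prompts) :
    (p ∈ pvFoundSet (PySem.Set.ofList prompts)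
        (PySem.List.sorted (PySem.Set.ofList (prompts.map PySem.Str.len)) (fun x => x) false) g)
      ↔ PySem.Str.isIn p g = true := by
  rw [pv_mem_foundSet, PySem.Str.isIn_iff_infix]
  constructor
  · rintro ⟨j, hj, L, hL, hslice, -⟩
    rw [PySem.List.mem_pyRange_one] at hj
    have hL0 : 0 ≤ L := by
      rw [PySem.List.mem_sorted, PySem.Set.mem_ofList, List.mem_map] at hL
      rcases hL with ⟨q, -, rfl⟩
      rw [PySem.Str.len_eq]
      exact Int.natCast_nonneg _
    have hj0 : 0 ≤ j := hj.1
    have htl := congrArg String.toList hslice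
    rw [PySem.Str.toList_slice, PySem.Chars.slice_eq_listSlice,
      PySem.List.slice_toNat g.toList hj0 (by omega)] at htl
    rw [← htl]
    exact ((List.take_prefix _ _).isInfix).trans ((List.drop_suffix _ _).isInfix)
  · rintro ⟨pre, suf, hg⟩
    have hlen : pre.length + p.toList.length ≤ g.toList.length := by
      rw [← hg]
      simp [List.length_append]
    refine ⟨(pre.length : Int), ?_, PySem.Str.len p, ?_, ?_,
      (PySem.Set.mem_ofList prompts p).2 hp⟩
    · rw [PySem.List.mem_pyRange_one, PySem.Str.len_eq]
      omega
    · rw [PySem.List.mem_sorted, PySem.Set.mem_ofList]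
      exact List.mem_map_of_mem hp
    · apply String.toList_inj.mp
      rw [PySem.Str.toList_slice, PySem.Chars.slice_eq_listSlice, PySem.Str.len_eq,
        PySem.List.slice_natCast_add, ← hg, List.append_assoc, List.drop_left,
        List.take_left]

-- list-shape step: filtering the zip of gens with its own map, then projecting
theorem pv_zip_filter (gens : List String) (f : String → PySem.Set String) (p : String) :
    ((gens.zip (gens.map f)).filter (fun gs => PySem.Set.contains gs.2 p)).map (fun gs => gs.1)
      = gens.filter (fun g => PySem.Set.contains (f g) p) := by
  induction gens with
  | nil => rfl
  | cons g t ih =>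
      simp only [List.map_cons, List.zip_cons_cons, List.filter_cons]
      simp at ih
      by_cases h : p ∈ f g <;> simp [h, ih]

-- ===== VERDICT (by name: the statement is the Claim_ definition above) =====
theorem group_gens_by_prompt_spec : Claim_equal_group_gens_by_prompt := by
  intro gens prompts _
  unfold Spec_group_gens_by_prompt group_gens_by_prompt group_gens_by_prompt_alt
  rw [PySem.List.foldl_append_singleton_eq_map]
  simp only [List.nil_append]
  refine List.map_congr_left (fun p hp => ?_)
  rw [PySem.List.foldl_append_if_eq_filter, List.nil_append, pv_zip_filter]
  refine List.filter_congr (fun g _ => ?_)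
  rw [Bool.eq_iff_iff, PySem.Set.contains_iff, pv_found_iff_isIn prompts g p hp]
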